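-- pv_equiv track=rewrite | github.com/Leon-ED/but-crypto | crypto_but.py | decrypte_mieux
-- ===== SOURCE A (Python) =====
-- def encrypte_aux(lettre,cle,c):
--     etape1 = (ord(lettre)-ord(c)+cle)%26
--     etape2 = etape1+ord(c)
--     return chr(etape2)
--
-- def encrypte_lettre(lettre, cle):
--   """
--   >>> encrypte_lettre('a',10), encrypte_lettre('a',26)
--   ('k', 'a')
--   >>> encrypte_lettre('z',1), encrypte_lettre('a',260)
--   ('a', 'a')
--   >>> encrypte_lettre('A',10), encrypte_lettre('A',26)
--   ('K', 'A')
--   >>> encrypte_lettre('w',10), encrypte_lettre('W',10)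
--   ('g', 'G')
--   """
--
--   if not lettre.isalpha():
--     return lettre
--   if lettre.islower():
--     return encrypte_aux(lettre,cle,'a')
--   return encrypte_aux(lettre,cle,'A')
--
-- def decrypte_mieux(texte, cle):
--   """
--   >>> decrypte_mieux('def hi k mnopq stuvwxyzabcd fgh',3)
--   'abc de f ghijk lmnopqrstuvw xyz'
--   >>> decrypte_mieux('Wrwr iwx zsj moxglk, hclj lma yncrcnb tkwloc.',3)
--   'Toto est une girafe, avec des petites jambes.'
--   """
--   mot = ""
--   cle2 = cle
--   for i in range(len(texte)):
--     mot += encrypte_lettre(texte[i],26-cle2)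
--     if texte[i] == " ":
--       cle2 += 1
--   return mot
-- ===== SOURCE B (Python) =====
-- def encrypte_aux(lettre,cle,c):
--     etape1 = (ord(lettre)-ord(c)+cle)%26
--     etape2 = etape1+ord(c)
--     return chr(etape2)
--
-- def encrypte_lettre(lettre, cle):
--   if not lettre.isalpha():
--     return lettre
--   if lettre.islower():
--     return encrypte_aux(lettre,cle,'a')
--   return encrypte_aux(lettre,cle,'A')
--
-- def decrypte_mieux(texte, cle):
--   mots = texte.split(' ')
--   return ' '.join(''.join(encrypte_lettre(ch, 26-(cle+k)) for ch in mot)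
--                   for k, mot in enumerate(mots))
-- ===== Notes on version B (the rewrite author's own statement) =====
-- stated objective: simpler
-- what changed: B splits the text on ' ', decrypts the k-th token with key 26-(cle+k) and joins with ' ', eliminating the running cle2 counter and the per-character space check.
import Mathlib
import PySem

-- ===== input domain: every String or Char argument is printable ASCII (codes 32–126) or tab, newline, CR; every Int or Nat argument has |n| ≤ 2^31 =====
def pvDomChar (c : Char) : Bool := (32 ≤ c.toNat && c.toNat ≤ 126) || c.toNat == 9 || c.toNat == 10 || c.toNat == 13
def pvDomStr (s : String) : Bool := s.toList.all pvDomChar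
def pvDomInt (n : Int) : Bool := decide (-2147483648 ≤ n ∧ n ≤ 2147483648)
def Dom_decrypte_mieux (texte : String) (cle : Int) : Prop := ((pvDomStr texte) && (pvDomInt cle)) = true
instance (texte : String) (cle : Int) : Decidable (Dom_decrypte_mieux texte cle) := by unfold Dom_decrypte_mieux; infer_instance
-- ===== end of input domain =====

-- B replaces A's running per-space counter with split-on-' ' / decrypt k-th token with key 26-(cle+k) / join (objective: simpler); return values proved equal.

-- ===== PORT A =====
-- chr((ord(lettre)-ord(c)+cle)%26 + ord(c)); Python '%' = PySem.Int.mod; result is in 0..25 so chr is Char.ofNat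
def encrypte_aux (lettre : Char) (cle : Int) (c : Char) : Char :=
  let etape1 := PySem.Int.mod ((lettre.toNat : Int) - (c.toNat : Int) + cle) 26
  let etape2 := etape1 + (c.toNat : Int)
  Char.ofNat etape2.toNat

def encrypte_lettre (lettre : Char) (cle : Int) : Char :=
  if ¬ PySem.Chars.isalpha lettre then lettre
  else if PySem.Chars.islower lettre then encrypte_aux lettre cle 'a'
  else encrypte_aux lettre cle 'A'

-- A's loop: accumulator (mot, cle2), one character appended per step
def decrypte_mieux (texte : String) (cle : Int) : String :=
  String.mk (texte.toList.foldl
    (fun (st : List Char × Int) ch =>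
      (st.1 ++ [encrypte_lettre ch (26 - st.2)],
       if ch = ' ' then st.2 + 1 else st.2))
    ([], cle)).1

-- ===== PORT B =====
-- hand port of texte.split(' '): exact for a single-character separator (''.split(' ') = [''], empty tokens kept)
def splitSp : List Char → List (List Char)
  | [] => [[]]
  | ch :: rest =>
    match splitSp rest with
    | [] => [[ch]]   -- unreachable: splitSp never returns []
    | t :: ts => if ch = ' ' then [] :: t :: ts else (ch :: t) :: ts

-- ''.join(encrypte_lettre(ch, key) for ch in mot)
def decrypte_mot (mot : List Char) (key : Int) : List Char :=
  mot.map (fun ch => encrypte_lettre ch key)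

def decrypte_mieux_alt (texte : String) (cle : Int) : String :=
  String.mk (PySem.Chars.join [' ']
    ((PySem.List.enumerate (splitSp texte.toList) 0).map
      (fun p => decrypte_mot p.2 (26 - (cle + p.1)))))

-- ===== PRECONDITION & SPEC =====
def Spec_decrypte_mieux (texte : String) (cle : Int) (out : String) : Prop := out = decrypte_mieux_alt texte cle
instance (texte : String) (cle : Int) (out : String) : Decidable (Spec_decrypte_mieux texte cle out) := by unfold Spec_decrypte_mieux; infer_instance

-- ===== CLAIM (what is proved, stated in full; the proofs are below) =====
def Claim_equal_decrypte_mieux : Prop := ∀ (texte : String) (cle : Int), Dom_decrypte_mieux texte cle → Spec_decrypte_mieux texte cle (decrypte_mieux texte cle)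

-- ===== LEMMAS AND PROOFS =====

-- A's loop as a structural recursion on the character list
def decA : List Char → Int → List Char
  | [], _ => []
  | ch :: rest, k =>
    encrypte_lettre ch (26 - k) :: decA rest (if ch = ' ' then k + 1 else k)

lemma foldl_decA (cs : List Char) : ∀ (acc : List Char) (k : Int),
    (cs.foldl (fun (st : List Char × Int) ch =>
      (st.1 ++ [encrypte_lettre ch (26 - st.2)],
       if ch = ' ' then st.2 + 1 else st.2)) (acc, k)).1 = acc ++ decA cs k := by
  induction cs with
  | nil => intro acc k; simp [decA]
  | cons ch rest ih => intro acc k; simp [decA, ih]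

-- B's joined output as a structural recursion over the token list with an absolute key
def decJ : List (List Char) → Int → List Char
  | [], _ => []
  | [w], k => decrypte_mot w (26 - k)
  | w :: w' :: ws, k => decrypte_mot w (26 - k) ++ ' ' :: decJ (w' :: ws) (k + 1)

lemma splitSp_ne_nil (cs : List Char) : splitSp cs ≠ [] := by
  cases cs with
  | nil => simp [splitSp]
  | cons ch rest =>
    simp only [splitSp]
    rcases h : splitSp rest with _ | ⟨t, ts⟩ <;> simp <;> split <;> simp

lemma decJ_cons_head (ch : Char) (t : List Char) (ts : List (List Char)) (k : Int) :
    decJ ((ch :: t) :: ts) k = encrypte_lettre ch (26 - k) :: decJ (t :: ts) k := by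
  cases ts <;> simp [decJ, decrypte_mot]

lemma encrypte_lettre_space (k : Int) : encrypte_lettre ' ' k = ' ' := by
  simp [encrypte_lettre, show PySem.Chars.isalpha ' ' = false from rfl]

lemma decA_eq_decJ (cs : List Char) : ∀ (k : Int), decA cs k = decJ (splitSp cs) k := by
  induction cs with
  | nil => intro k; simp [decA, splitSp, decJ, decrypte_mot]
  | cons ch rest ih =>
    intro k
    rcases h : splitSp rest with _ | ⟨t, ts⟩
    · exact absurd h (splitSp_ne_nil rest)
    · by_cases hsp : ch = ' '
      · subst hsp
        simp only [decA, splitSp, h, encrypte_lettre_space, if_true]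
        rw [show decJ ([] :: t :: ts) k = decrypte_mot [] (26 - k) ++ ' ' :: decJ (t :: ts) (k + 1) from rfl]
        simp [decrypte_mot, ih (k + 1), h]
      · simp only [decA, splitSp, h, if_neg hsp, decJ_cons_head]
        rw [ih k, h]

lemma join_enumerate_decJ (mots : List (List Char)) (cle : Int) : ∀ (k0 : Int),
    PySem.Chars.join [' ']
      ((PySem.List.enumerate mots k0).map (fun p => decrypte_mot p.2 (26 - (cle + p.1))))
      = decJ mots (cle + k0) := by
  induction mots with
  | nil => intro k0; simp [PySem.List.enumerate_nil, PySem.Chars.join_nil, decJ]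
  | cons w ws ih =>
    intro k0
    rw [PySem.List.enumerate_cons]
    cases ws with
    | nil =>
      simp [PySem.List.enumerate_nil, PySem.Chars.join_singleton, decJ]
    | cons w' ws' =>
      have hih := ih (k0 + 1)
      simp only [PySem.List.enumerate_cons, List.map_cons] at hih ⊢
      rw [PySem.Chars.join_cons_cons, hih, show cle + (k0 + 1) = cle + k0 + 1 by ring]
      simp [decJ, List.append_assoc]

-- ===== VERDICT (by name: the statement is the Claim_ definition above) =====
theorem decrypte_mieux_spec : Claim_equal_decrypte_mieux := by
  intro texte cle _
  unfold Spec_decrypte_mieux decrypte_mieux decrypte_mieux_alt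
  rw [foldl_decA, join_enumerate_decJ, decA_eq_decJ]
  norm_num
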